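-- pv_equiv track=rewrite | github.com/primrose101/CS322 | finite_state_machines/operator.py | operator_fsm
-- ===== SOURCE A (Python) =====
-- def operator_fsm(string_input, index):
--     i = index
--
--     table = [
--         (1, 2),
--         (2, 2),
--         (2, 2),
--     ]
--     state = 0
--     infut = 0
--     string_length = len(string_input)
--
--     while i < string_length:
--         if string_input[i] in ('+', '-', '*', '/', '%', '&', '(', ')'):
--             infut = 0
--         else:
--             infut = 1
--
--         state = table[state][infut]
--
--         if state == 2:
--             break
--
--         i += 1
--
--     return i - index
-- ===== SOURCE B (Python) =====
-- def operator_fsm(string_input, index):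
--     # The FSM accepts at most one character: return 1 iff string_input[index]
--     # is an operator character (0 when index >= len; negative indices count
--     # from the end and out-of-range negatives raise, exactly as in A).
--     if index < len(string_input) and string_input[index] in '+-*/%&()':
--         return 1
--     return 0
-- ===== Notes on version B (the rewrite author's own statement) =====
-- stated objective: simpler
-- what changed: Replaced the table-driven while-loop FSM with a single closed-form check: the FSM can consume at most one character, so return 1 iff index is in range and the character there is an operator, else 0.
import Mathlib
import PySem

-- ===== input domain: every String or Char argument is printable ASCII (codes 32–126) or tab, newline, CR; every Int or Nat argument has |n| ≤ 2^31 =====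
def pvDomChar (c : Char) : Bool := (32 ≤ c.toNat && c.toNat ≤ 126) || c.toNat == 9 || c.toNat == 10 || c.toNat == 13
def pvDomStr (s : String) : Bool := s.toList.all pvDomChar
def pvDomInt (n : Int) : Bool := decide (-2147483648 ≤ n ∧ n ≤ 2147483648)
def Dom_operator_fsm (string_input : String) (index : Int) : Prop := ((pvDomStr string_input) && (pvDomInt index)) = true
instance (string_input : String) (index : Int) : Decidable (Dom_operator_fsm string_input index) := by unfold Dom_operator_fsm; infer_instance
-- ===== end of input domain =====

-- B replaces A's table-driven while-loop FSM by a closed-form one-character check (objective: simpler).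

-- ===== PORT A =====
-- the while loop of A: state/i are the loop variables; `none` from pyGet? is
-- Python's IndexError (excluded by Pre_), we return 0 there
def operator_fsm_loop (s : List Char) (string_length : Int) (table : List (Int × Int))
    (index : Int) (state i : Int) : Int :=
  if _h : i < string_length then
    match PySem.List.pyGet? s i with
    | none => 0  -- IndexError in Python; outside Pre_
    | some ch =>
      let infut : Int :=
        if ch = '+' ∨ ch = '-' ∨ ch = '*' ∨ ch = '/' ∨ ch = '%' ∨ ch = '&' ∨ ch = '(' ∨ ch = ')'
        then 0 else 1
      match PySem.List.pyGet? table state with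
      | none => 0  -- IndexError in Python; unreachable (state is always 0, 1 or 2)
      | some row =>
        let state' : Int := if infut = 0 then row.1 else row.2  -- table[state][infut]
        if state' = 2 then i - index
        else operator_fsm_loop s string_length table index state' (i + 1)
  else i - index
termination_by (string_length - i).toNat
decreasing_by omega

def operator_fsm (string_input : String) (index : Int) : Int :=
  let table : List (Int × Int) := [(1, 2), (2, 2), (2, 2)]
  let string_length : Int := PySem.Str.len string_input
  operator_fsm_loop string_input.toList string_length table index 0 index

-- ===== PORT B =====
def operator_fsm_alt (string_input : String) (index : Int) : Int :=
  if index < PySem.Str.len string_input then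
    match PySem.List.pyGet? string_input.toList index with
    | some c => if c ∈ ['+', '-', '*', '/', '%', '&', '(', ')'] then 1 else 0
    | none => 0  -- IndexError in Python; outside Pre_
  else 0

-- ===== PRECONDITION & SPEC =====
-- A raises IndexError exactly when index < -len(string_input) (the loop then reads
-- string_input[index] out of range); those inputs are excluded.
def Pre_operator_fsm (string_input : String) (index : Int) : Prop :=
  -(PySem.Str.len string_input) ≤ index
instance (string_input : String) (index : Int) : Decidable (Pre_operator_fsm string_input index) := by
  unfold Pre_operator_fsm; infer_instance

def pvWitness_operator_fsm : String × Int := ("+ab", 0)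

def Spec_operator_fsm (string_input : String) (index : Int) (out : Int) : Prop :=
  out = operator_fsm_alt string_input index
instance (string_input : String) (index : Int) (out : Int) : Decidable (Spec_operator_fsm string_input index out) := by
  unfold Spec_operator_fsm; infer_instance

-- ===== CLAIM (what is proved, stated in full; the proofs are below) =====
def Claim_equal_operator_fsm : Prop := ∀ (string_input : String) (index : Int),
  Dom_operator_fsm string_input index → Pre_operator_fsm string_input index →
  Spec_operator_fsm string_input index (operator_fsm string_input index)

-- ===== LEMMAS AND PROOFS =====

-- in state 1 the FSM breaks at the next step whatever it reads, so the loop returns i - index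
theorem operator_fsm_loop_state1 (s : List Char) (len index i : Int)
    (hlen : len = (s.length : Int)) (hi : -(s.length : Int) ≤ i) :
    operator_fsm_loop s len [(1, 2), (2, 2), (2, 2)] index 1 i = i - index := by
  rw [operator_fsm_loop]
  split
  · rename_i hlt
    have hin : PySem.Raise.InRange s.length i := by
      constructor <;> omega
    cases hget : PySem.List.pyGet? s i with
    | none =>
      rw [PySem.List.pyGet?_eq_none_iff] at hget
      exact absurd hin hget
    | some ch => simp
  · rfl

theorem operator_fsm_eq_alt (string_input : String) (index : Int)
    (hpre : Pre_operator_fsm string_input index) :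
    operator_fsm string_input index = operator_fsm_alt string_input index := by
  unfold Pre_operator_fsm at hpre
  have hlen : PySem.Str.len string_input = (string_input.toList.length : Int) := by
    simp [pysem]
  rw [hlen] at hpre
  unfold operator_fsm operator_fsm_alt
  rw [hlen, operator_fsm_loop]
  by_cases hlt : index < (string_input.toList.length : Int)
  · have hin : PySem.Raise.InRange string_input.toList.length index := by
      constructor <;> omega
    cases hget : PySem.List.pyGet? string_input.toList index with
    | none =>
      rw [PySem.List.pyGet?_eq_none_iff] at hget
      exact absurd hin hget
    | some ch =>
      rw [dif_pos hlt, if_pos hlt]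
      by_cases hop : ch = '+' ∨ ch = '-' ∨ ch = '*' ∨ ch = '/' ∨ ch = '%' ∨ ch = '&' ∨ ch = '(' ∨ ch = ')'
      · -- operator char: state goes 0 → 1, one more step then break; result 1
        have hmem : ch ∈ ['+', '-', '*', '/', '%', '&', '(', ')'] := by
          simp only [List.mem_cons, List.not_mem_nil, or_false]; tauto
        norm_num [hop, hmem, PySem.List.pyGet?, PySem.List.pyIdx?]
        rw [operator_fsm_loop_state1 string_input.toList (string_input.length : Int)
              index (index + 1) (by simp) (by omega)]
        omega
      · -- non-operator char: state goes 0 → 2, break immediately; result 0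
        have hmem : ch ∉ ['+', '-', '*', '/', '%', '&', '(', ')'] := by
          simp only [List.mem_cons, List.not_mem_nil, or_false]; tauto
        norm_num [hop, hmem, PySem.List.pyGet?, PySem.List.pyIdx?]
  · rw [dif_neg hlt, if_neg hlt]
    omega

-- ===== VERDICT (by name: the statement is the Claim_ definition above) =====
theorem operator_fsm_spec : Claim_equal_operator_fsm := by
  intro string_input index _ hpre
  unfold Spec_operator_fsm
  exact operator_fsm_eq_alt string_input index hpre
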